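-- pv_equiv track=rewrite | github.com/tkmonson/dsa-library | problems/image_overlap.py | largest_overlap4
-- ===== SOURCE A (Python) =====
-- from collections import defaultdict, deque
--
-- def largest_overlap4(img1: list[list[int]], img2: list[list[int]]) -> int:
--     n = len(img1)
--     q = deque([(img1, (0, 0))])
--     seen = set([(0, 0)])
--     max_overlap = 0
--
--     while q:
--         img, op = q.popleft()
--         if abs(op[0]) == n or abs(op[1]) == n:
--             continue
--
--         overlap = 0
--         for i in range(n):
--             for j in range(n):
--                 overlap += img[i][j] & img2[i][j]
--         max_overlap = max(max_overlap, overlap)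
--
--         if (new_op := (op[0] + 1, op[1])) not in seen:
--             right = [[0] + r[:-1] for r in img]
--             seen.add(new_op)
--             q.append((right, new_op))
--
--         if (new_op := (op[0] - 1, op[1])) not in seen:
--             left = [r[1:] + [0] for r in img]
--             seen.add(new_op)
--             q.append((left, new_op))
--
--         if (new_op := (op[0], op[1] + 1)) not in seen:
--             down = [[0] * n] + img[:-1]
--             seen.add(new_op)
--             q.append((down, new_op))
--
--         if (new_op := (op[0], op[1] - 1)) not in seen:
--             up = img[1:] + [[0] * n]
--             seen.add(new_op)
--             q.append((up, new_op))
--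
--     return max_overlap
-- ===== SOURCE B (Python) =====
-- def largest_overlap4(img1: list[list[int]], img2: list[list[int]]) -> int:
--     # Enumerate every translation offset (a, b) directly and sum the bitwise AND
--     # over the overlap window in place: no queue, no visited set, no shifted copies.
--     n = len(img1)
--     best = 0
--     for a in range(1 - n, n):          # horizontal shift
--         for b in range(1 - n, n):      # vertical shift
--             s = 0
--             for i in range(max(b, 0), min(n, n + b)):
--                 row = img1[i - b]
--                 for j in range(max(a, 0), min(n, n + a)):
--                     s += row[j - a] & img2[i][j]
--             if s > best:
--                 best = s
--     return best
-- ===== Notes on version B (the rewrite author's own statement) =====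
-- stated objective: faster
-- what changed: Replaced the BFS over explicitly shifted copies of img1 (deque + seen-set of offsets, four new n*n list copies per visited offset) by a direct double loop over all translation offsets that sums the bitwise AND over the overlap window in place; Pre_ excludes ragged inputs: rows shorter than n make A raise IndexError, and img1 rows longer than n are excluded because A's repeated row-slicing accidentally shifts cells beyond column n-1 into the frame.
-- outside the precondition, e.g. on largest_overlap4([[1, 1, 0], [1, 1, 2]], [[1, 2], [2, 1]]): A returns 3, B returns 2
import Mathlib
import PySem

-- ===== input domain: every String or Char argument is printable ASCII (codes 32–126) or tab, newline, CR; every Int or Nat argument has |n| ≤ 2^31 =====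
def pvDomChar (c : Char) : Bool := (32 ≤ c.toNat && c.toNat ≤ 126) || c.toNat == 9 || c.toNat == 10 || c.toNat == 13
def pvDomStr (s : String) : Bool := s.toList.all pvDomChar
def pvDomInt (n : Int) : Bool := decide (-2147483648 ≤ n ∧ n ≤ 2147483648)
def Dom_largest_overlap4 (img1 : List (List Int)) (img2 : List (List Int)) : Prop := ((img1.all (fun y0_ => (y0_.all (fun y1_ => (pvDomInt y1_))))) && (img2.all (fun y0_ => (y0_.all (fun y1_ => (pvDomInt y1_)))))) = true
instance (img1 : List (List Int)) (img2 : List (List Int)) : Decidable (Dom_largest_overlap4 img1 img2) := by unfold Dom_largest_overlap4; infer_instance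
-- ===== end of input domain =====

-- B replaces A's BFS over explicitly shifted copies of img1 by a direct enumeration of all
-- translation offsets with in-place window sums (no image copies, no queue/seen bookkeeping);
-- measured constant-factor speed-up, same O(n^4) asymptotics.

-- ===== PORT A =====
-- overlap accumulation loop of A (pyGetD indices are in range under Pre_)
def pvOverlapA (n : Int) (img : List (List Int)) (img2 : List (List Int)) : Int :=
  (PySem.List.pyRange 0 n 1).foldl (fun ov i =>
    (PySem.List.pyRange 0 n 1).foldl (fun ov j =>
      ov + PySem.Int.band (PySem.List.pyGetD (PySem.List.pyGetD img i []) j 0)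
        (PySem.List.pyGetD (PySem.List.pyGetD img2 i []) j 0)) ov) 0

-- the four image shifts: [[0] + r[:-1] for r in img], [r[1:] + [0] for r in img],
-- [[0] * n] + img[:-1], img[1:] + [[0] * n]   (r[:-1] = dropLast, r[1:] = drop 1: exact)
def pvShiftR (img : List (List Int)) : List (List Int) := img.map (fun r => 0 :: r.dropLast)
def pvShiftL (img : List (List Int)) : List (List Int) := img.map (fun r => r.drop 1 ++ [0])
def pvShiftD (n : Int) (img : List (List Int)) : List (List Int) :=
  List.replicate n.toNat (0 : Int) :: img.dropLast
def pvShiftU (n : Int) (img : List (List Int)) : List (List Int) :=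
  img.drop 1 ++ [List.replicate n.toNat (0 : Int)]

-- one 'if new_op not in seen: seen.add(new_op); q.append((shifted, new_op))' block
def pvPush (img : List (List Int)) (p : Int × Int)
    (st : List (List (List Int) × (Int × Int)) × PySem.Set (Int × Int)) :
    List (List (List Int) × (Int × Int)) × PySem.Set (Int × Int) :=
  if p ∈ st.2 then st else (st.1 ++ [(img, p)], PySem.Set.add st.2 p)

-- the while loop; fuel strictly exceeds the possible number of iterations (see pvBfs_isMax),
-- so the recursion always runs until the queue empties, exactly like Python's while
def pvBfs (n : Int) (img2 : List (List Int)) :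
    Nat → List (List (List Int) × (Int × Int)) → PySem.Set (Int × Int) → Int → Int
  | 0, _, _, m => m
  | _ + 1, [], _, m => m
  | fuel + 1, (img, op) :: q, seen, m =>
    if |op.1| = n ∨ |op.2| = n then pvBfs n img2 fuel q seen m
    else
      let m' := max m (pvOverlapA n img img2)
      let st := pvPush (pvShiftR img) (op.1 + 1, op.2) (q, seen)
      let st := pvPush (pvShiftL img) (op.1 - 1, op.2) st
      let st := pvPush (pvShiftD n img) (op.1, op.2 + 1) st
      let st := pvPush (pvShiftU n img) (op.1, op.2 - 1) st
      pvBfs n img2 fuel st.1 st.2 m'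

def largest_overlap4 (img1 : List (List Int)) (img2 : List (List Int)) : Int :=
  pvBfs (img1.length) img2 (2 * (2 * img1.length + 1) ^ 2 + 1)
    [(img1, (0, 0))] (PySem.Set.ofList [((0 : Int), (0 : Int))]) 0

-- ===== PORT B =====
-- the window sum s for one offset (a, b) (pyGetD indices are in range under Pre_)
def pvInnerSum (img1 : List (List Int)) (img2 : List (List Int)) (n a b : Int) : Int :=
  (PySem.List.pyRange (max b 0) (min n (n + b)) 1).foldl (fun s i =>
    (PySem.List.pyRange (max a 0) (min n (n + a)) 1).foldl (fun s j =>
      s + PySem.Int.band (PySem.List.pyGetD (PySem.List.pyGetD img1 (i - b) []) (j - a) 0)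
        (PySem.List.pyGetD (PySem.List.pyGetD img2 i []) j 0)) s) 0

def largest_overlap4_alt (img1 : List (List Int)) (img2 : List (List Int)) : Int :=
  let n : Int := PySem.List.len img1
  (PySem.List.pyRange (1 - n) n 1).foldl (fun best a =>
    (PySem.List.pyRange (1 - n) n 1).foldl (fun best b =>
      let s := pvInnerSum img1 img2 n a b
      if s > best then s else best) best) 0

-- ===== PRECONDITION & SPEC =====
-- Pre_ restricts to the task's natural domain of square images: rows of img1 shorter than
-- n = len(img1) (or an img2 without an n-by-n upper-left block) make A raise IndexError, and
-- img1 rows LONGER than n are excluded because A's repeated row-slicing accidentally shifts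
-- cells beyond column n-1 into the frame (an artefact of the copy-based shifting).
def Pre_largest_overlap4 (img1 : List (List Int)) (img2 : List (List Int)) : Prop :=
  (∀ r ∈ img1, r.length = img1.length) ∧ img1.length ≤ img2.length ∧
    (∀ r ∈ img2.take img1.length, img1.length ≤ r.length)
instance (img1 : List (List Int)) (img2 : List (List Int)) : Decidable (Pre_largest_overlap4 img1 img2) := by unfold Pre_largest_overlap4; infer_instance

def pvWitness_largest_overlap4 : List (List Int) × List (List Int) := ([[1]], [[1]])

def Spec_largest_overlap4 (img1 : List (List Int)) (img2 : List (List Int)) (out : Int) : Prop := out = largest_overlap4_alt img1 img2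
instance (img1 : List (List Int)) (img2 : List (List Int)) (out : Int) : Decidable (Spec_largest_overlap4 img1 img2 out) := by unfold Spec_largest_overlap4; infer_instance

-- ===== CLAIM (what is proved, stated in full; the proofs are below) =====
def Claim_equal_largest_overlap4 : Prop := ∀ (img1 : List (List Int)) (img2 : List (List Int)), Dom_largest_overlap4 img1 img2 → Pre_largest_overlap4 img1 img2 → Spec_largest_overlap4 img1 img2 (largest_overlap4 img1 img2)

-- ===== LEMMAS AND PROOFS =====

-- row r of img1 shifted horizontally by a (zeros shifted in), and the whole image
-- translated by (a, b): the value A's BFS carries at offset (a, b)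
def pvHsh (a : Int) (r : List Int) : List Int :=
  if 0 ≤ a then List.replicate a.toNat 0 ++ r.take (r.length - a.toNat)
  else r.drop (-a).toNat ++ List.replicate (-a).toNat 0

def pvFimg (img1 : List (List Int)) (a b : Int) : List (List Int) :=
  (PySem.List.pyRange 0 (img1.length : Int) 1).map (fun i =>
    if b ≤ i ∧ i < (img1.length : Int) + b
    then pvHsh a (PySem.List.pyGetD img1 (i - b) [])
    else List.replicate img1.length 0)

def pvOv (img1 img2 : List (List Int)) (v : Int × Int) : Int :=
  pvOverlapA (img1.length) (pvFimg img1 v.1 v.2) img2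

def pvIntr (n : Nat) (v : Int × Int) : Prop := v.1.natAbs < n ∧ v.2.natAbs < n
def pvNcb (n : Nat) (v : Int × Int) : Prop :=
  v.1.natAbs ≤ n ∧ v.2.natAbs ≤ n ∧ (v.1.natAbs < n ∨ v.2.natAbs < n)
def pvDist (v : Int × Int) : Nat := v.1.natAbs + v.2.natAbs
def pvNbs (v : Int × Int) : List (Int × Int) :=
  [(v.1 + 1, v.2), (v.1 - 1, v.2), (v.1, v.2 + 1), (v.1, v.2 - 1)]

def pvBoxL (n : Nat) : List (Int × Int) :=
  (PySem.List.pyRange (-(n : Int)) ((n : Int) + 1) 1).flatMap (fun x =>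
    (PySem.List.pyRange (-(n : Int)) ((n : Int) + 1) 1).map (fun y => (x, y)))
def pvMu (n : Nat) (q : List (List (List Int) × (Int × Int))) (seen : List (Int × Int)) : Nat :=
  q.length + 2 * ((pvBoxL n).length - seen.length)

def pvInv (img1 img2 : List (List Int)) (q : List (List (List Int) × (Int × Int)))
    (seen : List (Int × Int)) (m : Int) : Prop :=
  ∃ d : Nat, ∃ qA qB : List (List (List Int) × (Int × Int)),
    q = qA ++ qB ∧
    (∀ x ∈ qA, pvNcb img1.length x.2 ∧ pvDist x.2 = d ∧ x.1 = pvFimg img1 x.2.1 x.2.2) ∧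
    (∀ x ∈ qB, pvNcb img1.length x.2 ∧ pvDist x.2 = d + 1 ∧ x.1 = pvFimg img1 x.2.1 x.2.2) ∧
    (q.map Prod.snd).Nodup ∧
    seen.Nodup ∧
    (∀ x ∈ q, x.2 ∈ seen) ∧
    (∀ v : Int × Int, pvNcb img1.length v → pvDist v ≤ d → v ∈ seen) ∧
    (∀ v ∈ seen, pvNcb img1.length v ∧ pvDist v ≤ d + 1 ∧
      (pvDist v = d + 1 → v ∈ qB.map Prod.snd)) ∧
    (∀ v ∈ seen, v ∉ q.map Prod.snd → pvIntr img1.length v →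
      (∀ w ∈ pvNbs v, w ∈ seen) ∧ pvOv img1 img2 v ≤ m) ∧
    0 ≤ m ∧
    (m = 0 ∨ ∃ v ∈ seen, v ∉ q.map Prod.snd ∧ pvIntr img1.length v ∧ m = pvOv img1 img2 v)

def pvIsMax (img1 img2 : List (List Int)) (r : Int) : Prop :=
  0 ≤ r ∧
  (∀ v : Int × Int, pvIntr img1.length v → pvOv img1 img2 v ≤ r) ∧
  (r = 0 ∨ ∃ v : Int × Int, pvIntr img1.length v ∧ r = pvOv img1 img2 v)

-- entries of a shifted row
lemma pvHsh_getD (a : Int) (r : List Int) (j : Int) (h0 : 0 ≤ j) (h1 : j < (r.length : Int)) :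
    PySem.List.pyGetD (pvHsh a r) j 0 =
      if a ≤ j ∧ j - a < (r.length : Int) then PySem.List.pyGetD r (j - a) 0 else 0 := by
  have hjn : j.toNat < r.length := by omega
  by_cases ha : 0 ≤ a
  · have hlen : j.toNat < (pvHsh a r).length := by
      simp only [pvHsh, if_pos ha, List.length_append, List.length_replicate, List.length_take]
      omega
    rw [PySem.List.pyGetD_eq_getElem _ _ h0 (by exact_mod_cast (by omega : j < ((pvHsh a r).length : Int)))]
    simp only [pvHsh, if_pos ha]
    by_cases hj : j.toNat < a.toNat
    · rw [List.getElem_append_left (by simp only [List.length_replicate]; omega)]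
      rw [if_neg (by omega)]
      simp
    · rw [List.getElem_append_right (by simp only [List.length_replicate]; omega)]
      simp only [List.length_replicate]
      rw [List.getElem_take]
      rw [if_pos ⟨by omega, by omega⟩]
      rw [PySem.List.pyGetD_eq_getElem _ _ (by omega) (by exact_mod_cast (by omega : j - a < ((r.length:Int))))]
      congr 1
      omega
  · have hk : 1 ≤ (-a).toNat := by omega
    have hlen : j.toNat < (pvHsh a r).length := by
      simp only [pvHsh, if_neg ha, List.length_append, List.length_replicate, List.length_drop]
      omega
    rw [PySem.List.pyGetD_eq_getElem _ _ h0 (by exact_mod_cast (by omega : j < ((pvHsh a r).length : Int)))]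
    simp only [pvHsh, if_neg ha]
    by_cases hj : j.toNat < r.length - (-a).toNat
    · rw [List.getElem_append_left (by simp only [List.length_drop]; omega)]
      rw [List.getElem_drop]
      rw [if_pos ⟨by omega, by omega⟩]
      rw [PySem.List.pyGetD_eq_getElem _ _ (by omega) (by exact_mod_cast (by omega : j - a < ((r.length:Int))))]
      congr 1
      omega
    · rw [List.getElem_append_right (by simp only [List.length_drop]; omega)]
      rw [if_neg (by omega)]
      simp

lemma pvHsh_nonpos (a : Int) (r : List Int) (ha : a ≤ 0) :
    pvHsh a r = r.drop (-a).toNat ++ List.replicate (-a).toNat 0 := by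
  rcases eq_or_lt_of_le ha with h | h
  · subst h
    simp [pvHsh, List.take_length]
  · simp [pvHsh, not_le.mpr h]

lemma pvHsh_step_right (a : Int) (r : List Int) (ha : 0 ≤ a) (h : a.toNat + 1 ≤ r.length) :
    0 :: (pvHsh a r).dropLast = pvHsh (a + 1) r := by
  have h1 : (a + 1).toNat = a.toNat + 1 := by omega
  simp only [pvHsh, if_pos ha, if_pos (by omega : (0:Int) ≤ a + 1), h1]
  rw [List.dropLast_append_of_ne_nil (by
    intro hc
    have := congrArg List.length hc
    simp [List.length_take] at this
    omega)]
  rw [List.dropLast_eq_take, List.length_take, List.take_take]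
  rw [List.replicate_succ]
  have : min (min (r.length - a.toNat) r.length - 1) (r.length - a.toNat) = r.length - (a.toNat + 1) := by omega
  rw [this]
  simp

lemma pvHsh_step_left (a : Int) (r : List Int) (ha : a ≤ 0) (h : (-a).toNat + 1 ≤ r.length) :
    (pvHsh a r).drop 1 ++ [0] = pvHsh (a - 1) r := by
  rw [pvHsh_nonpos a r ha, pvHsh_nonpos (a - 1) r (by omega)]
  have h2 : (-(a - 1)).toNat = (-a).toNat + 1 := by omega
  rw [h2]
  rw [List.drop_append_of_le_length (by simp [List.length_drop]; omega)]
  rw [List.drop_drop, List.replicate_succ']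
  simp

lemma pvFimg_length (img1 : List (List Int)) (a b : Int) :
    (pvFimg img1 a b).length = img1.length := by
  simp [pvFimg]

lemma pvFimg_row_mem (img1 : List (List Int)) (b : Int) (i : Nat)
    (hb : b ≤ (i : Int)) (hi : (i : Int) < (img1.length : Int) + b) :
    PySem.List.pyGetD img1 ((i : Int) - b) [] ∈ img1 := by
  have h1 : (0 : Int) ≤ (i : Int) - b := by omega
  have h2 : (i : Int) - b < (img1.length : Int) := by omega
  rw [PySem.List.pyGetD_eq_getElem _ _ h1 h2]
  exact List.getElem_mem _

lemma pvFimg_getElem (img1 : List (List Int)) (a b : Int) (i : Nat)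
    (h : i < (pvFimg img1 a b).length) :
    (pvFimg img1 a b)[i] =
      if b ≤ (i : Int) ∧ (i : Int) < (img1.length : Int) + b
      then pvHsh a (PySem.List.pyGetD img1 ((i : Int) - b) [])
      else List.replicate img1.length 0 := by
  simp only [pvFimg, List.getElem_map, PySem.List.getElem_pyRange_one, zero_add]

lemma pvFimg_zero (img1 : List (List Int)) : pvFimg img1 0 0 = img1 := by
  apply List.ext_getElem (by simp [pvFimg])
  intro i h1 h2
  rw [pvFimg_getElem _ _ _ _ h1]
  rw [if_pos ⟨by omega, by push_cast; omega⟩]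
  rw [sub_zero, PySem.List.pyGetD_eq_getElem _ _ (by omega) (by push_cast; omega)]
  simp only [Int.toNat_natCast]
  simp [pvHsh, List.take_length]

lemma pvFimg_rowlen (img1 : List (List Int)) (hrow : ∀ r ∈ img1, img1.length ≤ r.length)
    (b : Int) (i : Nat) (hb : b ≤ (i : Int)) (hi : (i : Int) < (img1.length : Int) + b) :
    img1.length ≤ (PySem.List.pyGetD img1 ((i : Int) - b) []).length :=
  hrow _ (pvFimg_row_mem img1 b i hb hi)

-- the four step lemmas
lemma pvShiftR_F (img1 : List (List Int)) (a b : Int)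
    (hrow : ∀ r ∈ img1, img1.length ≤ r.length) (hn : 1 ≤ img1.length)
    (ha : 0 ≤ a) (ha2 : a.toNat + 1 ≤ img1.length) :
    pvShiftR (pvFimg img1 a b) = pvFimg img1 (a + 1) b := by
  apply List.ext_getElem (by simp [pvShiftR, pvFimg_length])
  intro i h1 h2
  simp only [pvShiftR, List.getElem_map]
  rw [pvFimg_getElem _ _ _ _ (by simp [pvShiftR, pvFimg_length] at h1 ⊢; omega),
    pvFimg_getElem _ _ _ _ h2]
  by_cases hw : b ≤ (i : Int) ∧ (i : Int) < (img1.length : Int) + b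
  · rw [if_pos hw, if_pos hw]
    exact pvHsh_step_right a _ ha
      (by have := pvFimg_rowlen img1 hrow b i hw.1 hw.2; omega)
  · rw [if_neg hw, if_neg hw]
    rw [List.dropLast_replicate]
    rw [show img1.length = img1.length - 1 + 1 from by omega, List.replicate_succ]
    simp

lemma pvShiftL_F (img1 : List (List Int)) (a b : Int)
    (hrow : ∀ r ∈ img1, img1.length ≤ r.length) (hn : 1 ≤ img1.length)
    (ha : a ≤ 0) (ha2 : (-a).toNat + 1 ≤ img1.length) :
    pvShiftL (pvFimg img1 a b) = pvFimg img1 (a - 1) b := by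
  apply List.ext_getElem (by simp [pvShiftL, pvFimg_length])
  intro i h1 h2
  simp only [pvShiftL, List.getElem_map]
  rw [pvFimg_getElem _ _ _ _ (by simp [pvShiftL, pvFimg_length] at h1 ⊢; omega),
    pvFimg_getElem _ _ _ _ h2]
  by_cases hw : b ≤ (i : Int) ∧ (i : Int) < (img1.length : Int) + b
  · rw [if_pos hw, if_pos hw]
    exact pvHsh_step_left a _ ha
      (by have := pvFimg_rowlen img1 hrow b i hw.1 hw.2; omega)
  · rw [if_neg hw, if_neg hw]
    rw [List.drop_replicate, ← List.replicate_succ']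
    congr 1
    omega

lemma pvShiftD_F (img1 : List (List Int)) (a b : Int) (hn : 1 ≤ img1.length) (hb : 0 ≤ b) :
    pvShiftD (img1.length) (pvFimg img1 a b) = pvFimg img1 a (b + 1) := by
  apply List.ext_getElem (by simp [pvShiftD, pvFimg_length]; omega)
  intro i h1 h2
  have hlen : i < img1.length := by simpa [pvFimg_length] using h2
  match i with
  | 0 =>
    simp only [pvShiftD, List.getElem_cons_zero]
    rw [pvFimg_getElem _ _ _ _ h2, if_neg (by push_neg; intro hb2; omega)]
    simp
  | j + 1 =>
    simp only [pvShiftD, List.getElem_cons_succ]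
    rw [List.getElem_dropLast, pvFimg_getElem _ _ _ _ (by simp [pvFimg_length]; omega),
      pvFimg_getElem _ _ _ _ h2]
    have hc1 : ((j + 1 : Nat) : Int) = (j : Int) + 1 := by push_cast; ring
    by_cases hw : b ≤ (j : Int) ∧ (j : Int) < (img1.length : Int) + b
    · rw [if_pos hw, if_pos (by constructor <;> omega)]
      congr 2
      omega
    · rw [if_neg hw, if_neg (by rw [hc1]; intro hc; exact hw ⟨by omega, by omega⟩)]

lemma pvShiftU_F (img1 : List (List Int)) (a b : Int) (hn : 1 ≤ img1.length) (hb : b ≤ 0) :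
    pvShiftU (img1.length) (pvFimg img1 a b) = pvFimg img1 a (b - 1) := by
  apply List.ext_getElem (by simp [pvShiftU, pvFimg_length]; omega)
  intro i h1 h2
  have hlen : i < img1.length := by simpa [pvFimg_length] using h2
  rw [pvFimg_getElem _ _ _ _ h2]
  simp only [pvShiftU]
  by_cases hi : i < img1.length - 1
  · rw [List.getElem_append_left (by simp [pvFimg_length]; omega)]
    rw [List.getElem_drop, pvFimg_getElem _ _ _ _ (by simp [pvFimg_length]; omega)]
    have hc1 : ((1 + i : Nat) : Int) = (i : Int) + 1 := by push_cast; ring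
    by_cases hw : b - 1 ≤ (i : Int) ∧ (i : Int) < (img1.length : Int) + (b - 1)
    · rw [if_pos (by rw [hc1]; constructor <;> omega), if_pos hw]
      congr 2
      omega
    · rw [if_neg (by rw [hc1]; intro hc; exact hw ⟨by omega, by omega⟩), if_neg hw]
  · rw [List.getElem_append_right (by simp [pvFimg_length]; omega)]
    rw [if_neg (by push_neg; intro hb2; omega)]
    simp

lemma pvNcb_of_intr (n : Nat) (v : Int × Int) (h : pvIntr n v) : pvNcb n v :=
  ⟨Nat.le_of_lt h.1, Nat.le_of_lt h.2, Or.inl h.1⟩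

lemma pvNcb_mem_box (n : Nat) (v : Int × Int) (h : pvNcb n v) : v ∈ pvBoxL n := by
  obtain ⟨x, y⟩ := v
  obtain ⟨h1, h2, _⟩ := h
  refine List.mem_flatMap.mpr ⟨x, PySem.List.mem_pyRange_one.mpr ⟨by omega, by omega⟩, ?_⟩
  exact List.mem_map.mpr ⟨y, PySem.List.mem_pyRange_one.mpr ⟨by omega, by omega⟩, rfl⟩

lemma pvSeen_le_box (n : Nat) (seen : List (Int × Int)) (hnd : seen.Nodup)
    (hsub : ∀ v ∈ seen, pvNcb n v) : seen.length ≤ (pvBoxL n).length := by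
  calc seen.length = seen.toFinset.card := (List.toFinset_card_of_nodup hnd).symm
    _ ≤ (pvBoxL n).toFinset.card :=
        Finset.card_le_card (fun v hv =>
          List.mem_toFinset.mpr (pvNcb_mem_box n v (hsub v (List.mem_toFinset.mp hv))))
    _ ≤ (pvBoxL n).length := (pvBoxL n).toFinset_card_le

lemma pvBoxL_length (n : Nat) : (pvBoxL n).length = (2 * n + 1) * (2 * n + 1) := by
  simp only [pvBoxL, List.length_flatMap, List.map_map, Function.comp_def, List.length_map,
    PySem.List.length_pyRange_one, List.map_const', List.sum_replicate, smul_eq_mul]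
  have h1 : ((n : Int) + 1 - -(n : Int)).toNat = 2 * n + 1 := by omega
  rw [h1]

-- every non-corner box point away from the origin has an interior neighbour one step closer
lemma pvNbr_toward (n : Nat) (v : Int × Int) (hv : pvNcb n v) (hd : 1 ≤ pvDist v) :
    ∃ u : Int × Int, pvIntr n u ∧ pvDist u + 1 = pvDist v ∧ v ∈ pvNbs u := by
  obtain ⟨x, y⟩ := v
  obtain ⟨hx, hy, hlt⟩ := hv
  simp only [pvDist] at hd ⊢
  by_cases hyn : y.natAbs = n
  · have hxn : x.natAbs < n := by omega
    rcases lt_trichotomy y 0 with h | h | h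
    · exact ⟨(x, y + 1), ⟨hxn, by omega⟩, by omega,
        by simp [pvNbs]⟩
    · omega
    · exact ⟨(x, y - 1), ⟨hxn, by omega⟩, by omega,
        by simp [pvNbs]⟩
  · by_cases hx0 : x = 0
    · subst hx0
      have hn1 : 1 ≤ n := by omega
      rcases lt_trichotomy y 0 with h | h | h
      · exact ⟨(0, y + 1), ⟨by omega, by omega⟩, by omega,
          by simp [pvNbs]⟩
      · omega
      · exact ⟨(0, y - 1), ⟨by omega, by omega⟩, by omega,
          by simp [pvNbs]⟩
    · have hyn' : y.natAbs < n := by omega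
      rcases lt_trichotomy x 0 with h | h | h
      · exact ⟨(x + 1, y), ⟨by omega, hyn'⟩, by omega,
          by simp [pvNbs]⟩
      · omega
      · exact ⟨(x - 1, y), ⟨by omega, hyn'⟩, by omega,
          by simp [pvNbs]⟩

-- with an empty queue, seen (= processed) contains every interior point
lemma pvSeen_all (img1 img2 : List (List Int)) (seen : List (Int × Int)) (m : Int)
    (hn : 1 ≤ img1.length) (hinv : pvInv img1 img2 [] seen m) :
    ∀ v : Int × Int, pvIntr img1.length v → v ∈ seen := by
  obtain ⟨d, qA, qB, hsplit, hA, hB, hnd, hsnd, hqseen, hcov, hseen, hproc, hm0, hwit⟩ := hinv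
  have main : ∀ k : Nat, ∀ v : Int × Int, pvIntr img1.length v → pvDist v = k → v ∈ seen := by
    intro k
    induction k using Nat.strong_induction_on with
    | _ k ih =>
      intro v hv hdk
      by_cases h0 : pvDist v = 0
      · have hv0 : v = (0, 0) := by
          obtain ⟨x, y⟩ := v
          simp only [pvDist] at h0
          simp only [Prod.ext_iff]
          constructor <;> [skip; skip] <;> omega
        subst hv0
        exact hcov (0, 0) ⟨by omega, by omega, Or.inl (by simpa using hv.1)⟩ (by simp [pvDist])
      · obtain ⟨u, hu, hdu, hmem⟩ := pvNbr_toward img1.length v (pvNcb_of_intr _ _ hv) (by omega)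
        have hus : u ∈ seen := ih (pvDist u) (by omega) u hu rfl
        exact (hproc u hus (by simp) hu).1 _ hmem
  exact fun v hv => main (pvDist v) v hv rfl

-- B's running maximum over all offsets
lemma pvRunMax (f : Int → Int) (l : List Int) (c : Int) :
    c ≤ l.foldl (fun acc x => if f x > acc then f x else acc) c ∧
    (∀ x ∈ l, f x ≤ l.foldl (fun acc x => if f x > acc then f x else acc) c) ∧
    (l.foldl (fun acc x => if f x > acc then f x else acc) c = c ∨
      ∃ x ∈ l, l.foldl (fun acc x => if f x > acc then f x else acc) c = f x) := by
  induction l generalizing c with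
  | nil => simp
  | cons x xs ih =>
    simp only [List.foldl_cons]
    obtain ⟨h1, h2, h3⟩ := ih (if f x > c then f x else c)
    refine ⟨le_trans (by split <;> omega) h1, ?_, ?_⟩
    · intro z hz
      rcases List.mem_cons.mp hz with rfl | hz'
      · exact le_trans (by split <;> omega) h1
      · exact h2 z hz'
    · rcases h3 with h | ⟨z, hz, hzz⟩
      · by_cases hcmp : f x > c
        · right; exact ⟨x, List.mem_cons_self .., by rw [h, if_pos hcmp]⟩
        · left; rw [h, if_neg hcmp]
      · right; exact ⟨z, List.mem_cons_of_mem _ hz, hzz⟩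

def pvPushList (cands : List (List (List Int) × (Int × Int)))
    (st : List (List (List Int) × (Int × Int)) × PySem.Set (Int × Int)) :
    List (List (List Int) × (Int × Int)) × PySem.Set (Int × Int) :=
  cands.foldl (fun st c => pvPush c.1 c.2 st) st

lemma pvPushList_spec (img1 : List (List Int)) (d : Nat)
    (cands : List (List (List Int) × (Int × Int))) :
    ∀ (q : List (List (List Int) × (Int × Int))) (seen : PySem.Set (Int × Int)),
    (∀ c ∈ cands, c.2 ∈ seen ∨
      (pvNcb img1.length c.2 ∧ pvDist c.2 = d + 1 ∧ c.1 = pvFimg img1 c.2.1 c.2.2)) →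
    (q.map Prod.snd).Nodup → seen.Nodup → (∀ x ∈ q, x.2 ∈ seen) →
    (∀ v ∈ seen, pvNcb img1.length v) →
    (∀ v ∈ seen, v ∈ (pvPushList cands (q, seen)).2) ∧
    (∀ v ∈ (pvPushList cands (q, seen)).2, v ∈ seen ∨
      (v ∈ (pvPushList cands (q, seen)).1.map Prod.snd ∧ pvNcb img1.length v ∧ pvDist v = d + 1)) ∧
    (∀ c ∈ cands, c.2 ∈ (pvPushList cands (q, seen)).2) ∧
    (∃ new, (pvPushList cands (q, seen)).1 = q ++ new ∧
      ∀ x ∈ new, (pvNcb img1.length x.2 ∧ pvDist x.2 = d + 1 ∧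
        x.1 = pvFimg img1 x.2.1 x.2.2) ∧ x.2 ∉ seen) ∧
    ((pvPushList cands (q, seen)).1.map Prod.snd).Nodup ∧
    (pvPushList cands (q, seen)).2.Nodup ∧
    (∀ x ∈ (pvPushList cands (q, seen)).1, x.2 ∈ (pvPushList cands (q, seen)).2) ∧
    (∀ v ∈ (pvPushList cands (q, seen)).2, pvNcb img1.length v) ∧
    ((pvPushList cands (q, seen)).1.length +
        2 * ((pvBoxL img1.length).length - (pvPushList cands (q, seen)).2.length)
      ≤ q.length + 2 * ((pvBoxL img1.length).length - seen.length)) := by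
  induction cands with
  | nil =>
    intro q seen _ hnd hsnd hqs hsb
    exact ⟨fun v hv => hv, fun v hv => Or.inl hv, by simp, ⟨[], by simp [pvPushList], by simp⟩,
      hnd, hsnd, hqs, hsb, le_refl _⟩
  | cons c cs ih =>
    intro q seen hok hnd hsnd hqs hsb
    have hstep : pvPushList (c :: cs) (q, seen) = pvPushList cs (pvPush c.1 c.2 (q, seen)) := rfl
    by_cases hc : c.2 ∈ seen
    · have hpush : pvPush c.1 c.2 (q, seen) = (q, seen) := by simp [pvPush, hc]
      rw [hstep, hpush]
      obtain ⟨s1, s2, s3, s4, s5, s6, s7, s8, s9⟩ :=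
        ih q seen (fun c' hc' => hok c' (List.mem_cons_of_mem _ hc')) hnd hsnd hqs hsb
      refine ⟨s1, s2, ?_, s4, s5, s6, s7, s8, s9⟩
      intro c' hc'
      rcases List.mem_cons.mp hc' with rfl | h
      · exact s1 _ hc
      · exact s3 _ h
    · have hpush : pvPush c.1 c.2 (q, seen) = (q ++ [c], seen ++ [c.2]) := by
        simp [pvPush, hc, PySem.Set.add_of_not_mem hc]
      obtain ⟨hncb, hdist, hF⟩ := (hok c (List.mem_cons_self ..)).resolve_left hc
      have hok' : ∀ c' ∈ cs, c'.2 ∈ seen ++ [c.2] ∨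
          (pvNcb img1.length c'.2 ∧ pvDist c'.2 = d + 1 ∧
            c'.1 = pvFimg img1 c'.2.1 c'.2.2) :=
        fun c' hc' => (hok c' (List.mem_cons_of_mem _ hc')).imp
          (fun h => List.mem_append_left _ h) id
      have hnd' : ((q ++ [c]).map Prod.snd).Nodup := by
        rw [List.map_append]
        refine List.nodup_append.mpr ⟨hnd, by simp, ?_⟩
        intro a ha b hb
        have hb' : b = c.2 := by simpa using hb
        subst hb'
        obtain ⟨x, hx, hx2⟩ := List.mem_map.mp ha
        exact fun heq => hc (heq ▸ hx2 ▸ hqs x hx)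
      have hsnd' : (seen ++ [c.2]).Nodup := by
        refine List.nodup_append.mpr ⟨hsnd, by simp, ?_⟩
        intro a ha b hb
        have hb' : b = c.2 := by simpa using hb
        subst hb'
        exact fun heq => hc (heq ▸ ha)
      have hqs' : ∀ x ∈ q ++ [c], x.2 ∈ seen ++ [c.2] := by
        intro x hx
        rcases List.mem_append.mp hx with h | h
        · exact List.mem_append_left _ (hqs x h)
        · simp only [List.mem_cons, List.not_mem_nil, or_false] at h
          subst h
          exact List.mem_append_right _ (by simp)
      have hsb' : ∀ v ∈ seen ++ [c.2], pvNcb img1.length v := by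
        intro v hv
        rcases List.mem_append.mp hv with h | h
        · exact hsb v h
        · simp only [List.mem_cons, List.not_mem_nil, or_false] at h
          exact h ▸ hncb
      obtain ⟨s1, s2, s3, s4, s5, s6, s7, s8, s9⟩ :=
        ih (q ++ [c]) (seen ++ [c.2]) hok' hnd' hsnd' hqs' hsb'
      rw [hstep, hpush]
      obtain ⟨new', hn1, hn2⟩ := s4
      refine ⟨?_, ?_, ?_, ?_, s5, s6, s7, s8, ?_⟩
      · exact fun v hv => s1 v (List.mem_append_left _ hv)
      · intro v hv
        rcases s2 v hv with h | h
        · rcases List.mem_append.mp h with h' | h'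
          · exact Or.inl h'
          · simp only [List.mem_cons, List.not_mem_nil, or_false] at h'
            subst h'
            refine Or.inr ⟨?_, hncb, hdist⟩
            rw [hn1]
            exact List.mem_map_of_mem (List.mem_append_left _ (List.mem_append_right _ (by simp)))
        · exact Or.inr h
      · intro c' hc'
        rcases List.mem_cons.mp hc' with rfl | h
        · exact s1 _ (List.mem_append_right _ (by simp))
        · exact s3 _ h
      · refine ⟨c :: new', by rw [hn1]; simp, ?_⟩
        intro x hx
        rcases List.mem_cons.mp hx with rfl | h
        · exact ⟨⟨hncb, hdist, hF⟩, hc⟩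
        · obtain ⟨hp, hns⟩ := hn2 x h
          exact ⟨hp, fun hcon => hns (List.mem_append_left _ hcon)⟩
      · have hble : (seen ++ [c.2]).length ≤ (pvBoxL img1.length).length :=
          pvSeen_le_box img1.length _ hsnd' hsb'
        simp only [List.length_append, List.length_cons, List.length_nil] at s9 hble ⊢
        omega

-- layer advance: when the current layer is exhausted, every point of the next layer is seen
lemma pvInv_advance (img1 img2 : List (List Int)) (q : List (List (List Int) × (Int × Int)))
    (seen : List (Int × Int)) (m : Int) (d : Nat)
    (h2 : ∀ x ∈ q, pvNcb img1.length x.2 ∧ pvDist x.2 = d + 1 ∧ x.1 = pvFimg img1 x.2.1 x.2.2)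
    (h5 : ∀ v : Int × Int, pvNcb img1.length v → pvDist v ≤ d → v ∈ seen)
    (h7 : ∀ v ∈ seen, v ∉ q.map Prod.snd → pvIntr img1.length v →
      (∀ w ∈ pvNbs v, w ∈ seen) ∧ pvOv img1 img2 v ≤ m) :
    ∀ v : Int × Int, pvNcb img1.length v → pvDist v ≤ d + 1 → v ∈ seen := by
  intro v hv hd1
  by_cases hdd : pvDist v ≤ d
  · exact h5 v hv hdd
  · obtain ⟨u, hu, hdu, hmem⟩ := pvNbr_toward img1.length v hv (by omega)
    have hus : u ∈ seen := h5 u (pvNcb_of_intr _ _ hu) (by omega)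
    have hnotq : u ∉ q.map Prod.snd := by
      intro hc
      obtain ⟨x, hx, hx2⟩ := List.mem_map.mp hc
      have := (h2 x hx).2.1
      rw [hx2] at this
      omega
    exact (h7 u hus hnotq hu).1 _ hmem

-- processing one popped queue entry of the current layer
lemma pvStep (img1 img2 : List (List Int)) (hn : 1 ≤ img1.length)
    (hrow : ∀ r ∈ img1, img1.length ≤ r.length) (fuel : Nat)
    (ih : ∀ q seen m, pvInv img1 img2 q seen m → pvMu img1.length q seen < fuel →
      pvIsMax img1 img2 (pvBfs (img1.length) img2 fuel q seen m))
    (img : List (List Int)) (op : Int × Int)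
    (rest : List (List (List Int) × (Int × Int))) (seen : PySem.Set (Int × Int)) (m : Int)
    (d : Nat) (qA qB : List (List (List Int) × (Int × Int)))
    (hsplit : rest = qA ++ qB)
    (hop : pvNcb img1.length op ∧ pvDist op = d ∧ img = pvFimg img1 op.1 op.2)
    (hA : ∀ x ∈ qA, pvNcb img1.length x.2 ∧ pvDist x.2 = d ∧ x.1 = pvFimg img1 x.2.1 x.2.2)
    (hB : ∀ x ∈ qB, pvNcb img1.length x.2 ∧ pvDist x.2 = d + 1 ∧ x.1 = pvFimg img1 x.2.1 x.2.2)
    (hnd : (((img, op) :: rest).map Prod.snd).Nodup)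
    (hsnd : seen.Nodup)
    (hqseen : ∀ x ∈ (img, op) :: rest, x.2 ∈ seen)
    (hcov : ∀ v : Int × Int, pvNcb img1.length v → pvDist v ≤ d → v ∈ seen)
    (hseen : ∀ v ∈ seen, pvNcb img1.length v ∧ pvDist v ≤ d + 1 ∧
      (pvDist v = d + 1 → v ∈ qB.map Prod.snd))
    (hproc : ∀ v ∈ seen, v ∉ ((img, op) :: rest).map Prod.snd → pvIntr img1.length v →
      (∀ w ∈ pvNbs v, w ∈ seen) ∧ pvOv img1 img2 v ≤ m)
    (hm0 : 0 ≤ m)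
    (hwit : m = 0 ∨ ∃ v ∈ seen, v ∉ ((img, op) :: rest).map Prod.snd ∧
      pvIntr img1.length v ∧ m = pvOv img1 img2 v)
    (hmu : pvMu img1.length ((img, op) :: rest) seen < fuel + 1) :
    pvIsMax img1 img2 (pvBfs (img1.length) img2 (fuel + 1) ((img, op) :: rest) seen m) := by
  have hnd_rest : (rest.map Prod.snd).Nodup := by
    simp only [List.map_cons] at hnd
    exact (List.nodup_cons.mp hnd).2
  have hop_notin_rest : op ∉ rest.map Prod.snd := by
    simp only [List.map_cons] at hnd
    exact (List.nodup_cons.mp hnd).1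
  have hopseen : op ∈ seen := hqseen (img, op) (List.mem_cons_self ..)
  simp only [pvBfs]
  by_cases hbd : |op.1| = (img1.length : Int) ∨ |op.2| = (img1.length : Int)
  · rw [if_pos hbd]
    have hbd' : op.1.natAbs = img1.length ∨ op.2.natAbs = img1.length := by
      rcases hbd with h | h
      · left
        have h2 := congrArg Int.natAbs h
        simpa [Int.natAbs_abs] using h2
      · right
        have h2 := congrArg Int.natAbs h
        simpa [Int.natAbs_abs] using h2
    refine ih rest seen m ⟨d, qA, qB, hsplit, hA, hB, hnd_rest, hsnd,
      (fun x hx => hqseen x (List.mem_cons_of_mem _ hx)), hcov, hseen, ?_, hm0, ?_⟩ ?_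
    · intro v hv hvq hintr
      by_cases hveq : v = op
      · subst hveq
        obtain ⟨h1, h2⟩ := hintr
        omega
      · refine hproc v hv ?_ hintr
        simp only [List.map_cons, List.mem_cons]
        rintro (h | h)
        · exact hveq h
        · exact hvq h
    · rcases hwit with h | ⟨v, hv, hvq, hintr, hval⟩
      · exact Or.inl h
      · exact Or.inr ⟨v, hv, fun hc => hvq (by simp only [List.map_cons, List.mem_cons]; right; exact hc),
          hintr, hval⟩
    · simp only [pvMu, List.length_cons] at hmu ⊢
      omega
  · rw [if_neg hbd]
    have hb1 : op.1.natAbs ≠ img1.length := fun hh =>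
      hbd (Or.inl (by rw [Int.abs_eq_natAbs, hh]))
    have hb2 : op.2.natAbs ≠ img1.length := fun hh =>
      hbd (Or.inr (by rw [Int.abs_eq_natAbs, hh]))
    have hintr : pvIntr img1.length op := ⟨by have := hop.1.1; omega, by have := hop.1.2.1; omega⟩
    show pvIsMax img1 img2 (pvBfs (img1.length) img2 fuel
      (pvPushList [(pvShiftR img, (op.1 + 1, op.2)), (pvShiftL img, (op.1 - 1, op.2)),
        (pvShiftD (img1.length) img, (op.1, op.2 + 1)),
        (pvShiftU (img1.length) img, (op.1, op.2 - 1))] (rest, seen)).1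
      (pvPushList [(pvShiftR img, (op.1 + 1, op.2)), (pvShiftL img, (op.1 - 1, op.2)),
        (pvShiftD (img1.length) img, (op.1, op.2 + 1)),
        (pvShiftU (img1.length) img, (op.1, op.2 - 1))] (rest, seen)).2
      (max m (pvOverlapA (img1.length) img img2)))
    set cands := [(pvShiftR img, (op.1 + 1, op.2)), (pvShiftL img, (op.1 - 1, op.2)),
      (pvShiftD (img1.length : Int) img, (op.1, op.2 + 1)),
      (pvShiftU (img1.length : Int) img, (op.1, op.2 - 1))] with hcands
    have hov : pvOverlapA (img1.length) img img2 = pvOv img1 img2 op := by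
      rw [hop.2.2]; rfl
    have hok : ∀ c ∈ cands, c.2 ∈ seen ∨
        (pvNcb img1.length c.2 ∧ pvDist c.2 = d + 1 ∧ c.1 = pvFimg img1 c.2.1 c.2.2) := by
      intro c hc
      simp only [hcands, List.mem_cons, List.not_mem_nil, or_false] at hc
      rcases hc with rfl | rfl | rfl | rfl
      · by_cases hs : 0 ≤ op.1
        · refine Or.inr ⟨⟨by simp only; have := hintr.1; omega, by simp only; have := hintr.2; omega,
            Or.inr (by simp only; exact hintr.2)⟩, ?_, ?_⟩
          · simp only [pvDist]
            have := hop.2.1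
            simp only [pvDist] at this
            omega
          · simp only
            rw [hop.2.2]
            exact pvShiftR_F img1 op.1 op.2 hrow hn hs (by have := hintr.1; omega)
        · left
          refine hcov _ ⟨by simp only; have := hintr.1; omega,
            by simp only; have := hintr.2; omega, Or.inr (by simp only; exact hintr.2)⟩ ?_
          simp only [pvDist]
          have := hop.2.1
          simp only [pvDist] at this
          omega
      · by_cases hs : op.1 ≤ 0
        · refine Or.inr ⟨⟨by simp only; have := hintr.1; omega, by simp only; have := hintr.2; omega,
            Or.inr (by simp only; exact hintr.2)⟩, ?_, ?_⟩
          · simp only [pvDist]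
            have := hop.2.1
            simp only [pvDist] at this
            omega
          · simp only
            rw [hop.2.2]
            exact pvShiftL_F img1 op.1 op.2 hrow hn hs (by have := hintr.1; omega)
        · left
          refine hcov _ ⟨by simp only; have := hintr.1; omega,
            by simp only; have := hintr.2; omega, Or.inr (by simp only; have := hintr.2; omega)⟩ ?_
          simp only [pvDist]
          have := hop.2.1
          simp only [pvDist] at this
          omega
      · by_cases hs : 0 ≤ op.2
        · refine Or.inr ⟨⟨by simp only; have := hintr.1; omega, by simp only; have := hintr.2; omega,
            Or.inl (by simp only; exact hintr.1)⟩, ?_, ?_⟩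
          · simp only [pvDist]
            have := hop.2.1
            simp only [pvDist] at this
            omega
          · simp only
            rw [hop.2.2]
            exact pvShiftD_F img1 op.1 op.2 hn hs
        · left
          refine hcov _ ⟨by simp only; have := hintr.1; omega,
            by simp only; have := hintr.2; omega, Or.inl (by simp only; exact hintr.1)⟩ ?_
          simp only [pvDist]
          have := hop.2.1
          simp only [pvDist] at this
          omega
      · by_cases hs : op.2 ≤ 0
        · refine Or.inr ⟨⟨by simp only; have := hintr.1; omega, by simp only; have := hintr.2; omega,
            Or.inl (by simp only; exact hintr.1)⟩, ?_, ?_⟩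
          · simp only [pvDist]
            have := hop.2.1
            simp only [pvDist] at this
            omega
          · simp only
            rw [hop.2.2]
            exact pvShiftU_F img1 op.1 op.2 hn hs
        · left
          refine hcov _ ⟨by simp only; have := hintr.1; omega,
            by simp only; have := hintr.2; omega, Or.inl (by simp only; exact hintr.1)⟩ ?_
          simp only [pvDist]
          have := hop.2.1
          simp only [pvDist] at this
          omega
    obtain ⟨s1, s2, s3, ⟨new, hnew1, hnew2⟩, s5, s6, s7, s8, s9⟩ :=
      pvPushList_spec img1 d cands rest seen hok hnd_rest hsnd
        (fun x hx => hqseen x (List.mem_cons_of_mem _ hx)) (fun v hv => (hseen v hv).1)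
    have hnotnew : ∀ v ∈ seen, v ∉ new.map Prod.snd := by
      intro v hv hc
      obtain ⟨x, hx, hx2⟩ := List.mem_map.mp hc
      exact (hnew2 x hx).2 (hx2 ▸ hv)
    refine ih _ _ _ ⟨d, qA, qB ++ new, ?_, hA, ?_, s5, s6, s7, ?_, ?_, ?_, ?_, ?_⟩ ?_
    · rw [hnew1, hsplit, List.append_assoc]
    · intro x hx
      rcases List.mem_append.mp hx with h | h
      · exact hB x h
      · exact (hnew2 x h).1
    · exact fun v hv hd => s1 v (hcov v hv hd)
    · intro v hv
      refine ⟨s8 v hv, ?_, ?_⟩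
      · rcases s2 v hv with h | h
        · exact (hseen v h).2.1
        · omega
      · intro hd1
        rcases s2 v hv with h | h
        · have := (hseen v h).2.2 hd1
          rw [List.map_append]
          exact List.mem_append_left _ this
        · obtain ⟨hmem, _, _⟩ := h
          rw [hnew1, List.map_append] at hmem
          rcases List.mem_append.mp hmem with h' | h'
          · rw [hsplit, List.map_append] at h'
            rcases List.mem_append.mp h' with h'' | h''
            · obtain ⟨x, hx, hx2⟩ := List.mem_map.mp h''
              have := (hA x hx).2.1
              rw [hx2] at this
              omega
            · rw [List.map_append]
              exact List.mem_append_left _ h''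
          · rw [List.map_append]
            exact List.mem_append_right _ h'
    · intro v hv2 hvq hintr2
      rcases s2 v hv2 with hvs | ⟨hmem, _, _⟩
      · by_cases hveq : v = op
        · subst hveq
          refine ⟨?_, ?_⟩
          · intro w hw
            simp only [pvNbs, List.mem_cons, List.not_mem_nil, or_false] at hw
            rcases hw with rfl | rfl | rfl | rfl
            · exact s3 (pvShiftR img, (v.1 + 1, v.2)) (by simp [hcands])
            · exact s3 (pvShiftL img, (v.1 - 1, v.2)) (by simp [hcands])
            · exact s3 (pvShiftD (img1.length : Int) img, (v.1, v.2 + 1)) (by simp [hcands])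
            · exact s3 (pvShiftU (img1.length : Int) img, (v.1, v.2 - 1)) (by simp [hcands])
          · rw [← hov]
            exact le_max_right _ _
        · have hvq0 : v ∉ ((img, op) :: rest).map Prod.snd := by
            simp only [List.map_cons, List.mem_cons]
            rintro (h | h)
            · exact hveq h
            · exact hvq (by rw [hnew1, List.map_append]; exact List.mem_append_left _ h)
          obtain ⟨hnb, hle⟩ := hproc v hvs hvq0 hintr2
          exact ⟨fun w hw => s1 w (hnb w hw), le_trans hle (le_max_left _ _)⟩
      · exact absurd hmem hvq
    · exact le_trans hm0 (le_max_left _ _)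
    · by_cases hcase : pvOverlapA (img1.length) img img2 ≤ m
      · rw [max_eq_left hcase]
        rcases hwit with h | ⟨v, hv, hvq, hintr2, hval⟩
        · exact Or.inl h
        · refine Or.inr ⟨v, s1 v hv, ?_, hintr2, hval⟩
          rw [hnew1, List.map_append]
          intro hc
          rcases List.mem_append.mp hc with h' | h'
          · exact hvq (by simp only [List.map_cons, List.mem_cons]; right; exact h')
          · exact hnotnew v hv h'
      · rw [max_eq_right (le_of_lt (not_le.mp hcase))]
        refine Or.inr ⟨op, s1 op hopseen, ?_, hintr, hov⟩
        rw [hnew1, List.map_append]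
        intro hc
        rcases List.mem_append.mp hc with h' | h'
        · exact hop_notin_rest h'
        · exact hnotnew op hopseen h'
    · simp only [pvMu, List.length_cons] at hmu s9 ⊢
      omega

-- the main induction over the loop
lemma pvBfs_isMax (img1 img2 : List (List Int)) (hn : 1 ≤ img1.length)
    (hrow : ∀ r ∈ img1, img1.length ≤ r.length) :
    ∀ fuel : Nat, ∀ q seen m, pvInv img1 img2 q seen m →
      pvMu img1.length q seen < fuel →
      pvIsMax img1 img2 (pvBfs (img1.length) img2 fuel q seen m) := by
  intro fuel
  induction fuel with
  | zero => exact fun q seen m _ hmu => absurd hmu (Nat.not_lt_zero _)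
  | succ fuel ih =>
    intro q seen m hinv hmu
    cases q with
    | nil =>
      have hall := pvSeen_all img1 img2 seen m hn hinv
      obtain ⟨d, qA, qB, _, _, _, _, _, _, _, _, hproc, hm0, hwit⟩ := hinv
      show pvIsMax img1 img2 m
      refine ⟨hm0, ?_, ?_⟩
      · intro v hv
        exact (hproc v (hall v hv) (by simp) hv).2
      · rcases hwit with h | ⟨v, _, _, hintr, hval⟩
        · exact Or.inl h
        · exact Or.inr ⟨v, hintr, hval⟩
    | cons x rest =>
      obtain ⟨img, op⟩ := x
      obtain ⟨d, qA, qB, hsplit, hA, hB, hnd, hsnd, hqseen, hcov, hseen, hproc, hm0, hwit⟩ := hinv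
      cases qA with
      | nil =>
        simp only [List.nil_append] at hsplit
        have hcov' := pvInv_advance img1 img2 ((img, op) :: rest) seen m d
          (hsplit ▸ hB) hcov hproc
        have hhead : pvNcb img1.length op ∧ pvDist op = d + 1 ∧ img = pvFimg img1 op.1 op.2 := by
          have := hB (img, op) (by rw [← hsplit]; exact List.mem_cons_self ..)
          exact this
        refine pvStep img1 img2 hn hrow fuel ih img op rest seen m (d + 1) rest [] (by simp)
          hhead ?_ (by simp) hnd hsnd hqseen hcov' ?_ hproc hm0 hwit hmu
        · intro x hx
          exact hB x (by rw [← hsplit]; exact List.mem_cons_of_mem _ hx)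
        · intro v hv
          obtain ⟨h1, h2, _⟩ := hseen v hv
          exact ⟨h1, by omega, fun hc => absurd hc (by omega)⟩
      | cons x0 qA' =>
        rw [List.cons_append] at hsplit
        injection hsplit with h1 h2
        subst h1
        exact pvStep img1 img2 hn hrow fuel ih img op rest seen m d qA' qB h2
          (hA (img, op) (List.mem_cons_self ..))
          (fun x hx => hA x (List.mem_cons_of_mem _ hx)) hB hnd hsnd hqseen hcov hseen
          hproc hm0 hwit hmu

lemma pvBand_zero_left (x : Int) : PySem.Int.band 0 x = 0 := by
  rw [PySem.Int.band_comm, PySem.Int.band_zero]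

lemma pvSum_split2 (g : Int → Int) (a m b : Int) (h1 : a ≤ m) (h2 : m ≤ b) :
    ((PySem.List.pyRange a b 1).map g).sum =
      ((PySem.List.pyRange a m 1).map g).sum + ((PySem.List.pyRange m b 1).map g).sum := by
  rw [PySem.List.pyRange_one_append a m b h1 h2, List.map_append, List.sum_append]

lemma pvSum_split3 (g : Int → Int) (a m1 m2 b : Int) (h1 : a ≤ m1) (h2 : m1 ≤ m2)
    (h3 : m2 ≤ b) :
    ((PySem.List.pyRange a b 1).map g).sum =
      ((PySem.List.pyRange a m1 1).map g).sum + ((PySem.List.pyRange m1 m2 1).map g).sum +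
        ((PySem.List.pyRange m2 b 1).map g).sum := by
  rw [PySem.List.pyRange_one_append a m1 b h1 (le_trans h2 h3), List.map_append,
    List.sum_append, pvSum_split2 g m1 m2 b h2 h3, add_assoc]

lemma pvGetD_replicate_zero (k : Nat) (j : Int) :
    PySem.List.pyGetD (List.replicate k (0 : Int)) j 0 = 0 := by
  rcases h : PySem.List.pyGet? (List.replicate k (0 : Int)) j with _ | v
  · simp [PySem.List.pyGetD, h]
  · have := PySem.List.mem_of_pyGet?_eq_some _ h
    have hv : v = 0 := List.eq_of_mem_replicate this
    simp [PySem.List.pyGetD, h, hv]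

-- A's overlap at offset (a, b) is B's window sum there (rows of img1 exactly n long)
lemma pvOv_eq_inner (img1 img2 : List (List Int))
    (hrow : ∀ r ∈ img1, r.length = img1.length)
    (h2a : img1.length ≤ img2.length)
    (h2b : ∀ r ∈ img2.take img1.length, img1.length ≤ r.length)
    (a b : Int) (ha : a.natAbs < img1.length) (hb : b.natAbs < img1.length) :
    pvOv img1 img2 (a, b) = pvInnerSum img1 img2 (img1.length) a b := by
  have hrl : ∀ i : Int, b ≤ i → i < (img1.length : Int) + b →
      (PySem.List.pyGetD img1 (i - b) []).length = img1.length := by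
    intro i h1 h2
    rw [PySem.List.pyGetD_eq_getElem _ _ (by omega) (by omega)]
    exact hrow _ (List.getElem_mem _)
  have hFrow : ∀ i : Int, 0 ≤ i → i < (img1.length : Int) →
      PySem.List.pyGetD (pvFimg img1 a b) i [] =
        if b ≤ i ∧ i < (img1.length : Int) + b
        then pvHsh a (PySem.List.pyGetD img1 (i - b) [])
        else List.replicate img1.length 0 := by
    intro i h1 h2
    rw [PySem.List.pyGetD_eq_getElem _ _ h1 (by rw [pvFimg_length]; omega)]
    rw [pvFimg_getElem _ _ _ _ (by rw [pvFimg_length]; omega)]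
    have hc : ((i.toNat : Int)) = i := by omega
    rw [hc]
  have e1 : pvOv img1 img2 (a, b) =
      ((PySem.List.pyRange 0 (img1.length : Int) 1).map (fun i =>
        ((PySem.List.pyRange 0 (img1.length : Int) 1).map (fun j =>
          PySem.Int.band (PySem.List.pyGetD (PySem.List.pyGetD (pvFimg img1 a b) i []) j 0)
            (PySem.List.pyGetD (PySem.List.pyGetD img2 i []) j 0))).sum)).sum := by
    simp only [pvOv, pvOverlapA, PySem.List.foldl_add, zero_add]
  have e2 : pvInnerSum img1 img2 (img1.length) a b =
      ((PySem.List.pyRange (max b 0) (min (img1.length : Int) ((img1.length : Int) + b)) 1).map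
        (fun i =>
        ((PySem.List.pyRange (max a 0) (min (img1.length : Int) ((img1.length : Int) + a)) 1).map
          (fun j =>
          PySem.Int.band (PySem.List.pyGetD (PySem.List.pyGetD img1 (i - b) []) (j - a) 0)
            (PySem.List.pyGetD (PySem.List.pyGetD img2 i []) j 0))).sum)).sum := by
    simp only [pvInnerSum, PySem.List.foldl_add, zero_add]
  rw [e1, e2]
  rw [pvSum_split3 _ 0 (max b 0) (min (img1.length : Int) ((img1.length : Int) + b))
    (img1.length : Int) (by omega) (by omega) (by omega)]
  have hz1 : ((PySem.List.pyRange 0 (max b 0) 1).map (fun i =>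
      ((PySem.List.pyRange 0 (img1.length : Int) 1).map (fun j =>
        PySem.Int.band (PySem.List.pyGetD (PySem.List.pyGetD (pvFimg img1 a b) i []) j 0)
          (PySem.List.pyGetD (PySem.List.pyGetD img2 i []) j 0))).sum)).sum = 0 := by
    apply List.sum_eq_zero
    intro x hx
    obtain ⟨i, hi, rfl⟩ := List.mem_map.mp hx
    rw [PySem.List.mem_pyRange_one] at hi
    apply List.sum_eq_zero
    intro y hy
    obtain ⟨j, _, rfl⟩ := List.mem_map.mp hy
    rw [hFrow i (by omega) (by omega), if_neg (by omega), pvGetD_replicate_zero,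
      pvBand_zero_left]
  have hz3 : ((PySem.List.pyRange (min (img1.length : Int) ((img1.length : Int) + b))
      (img1.length : Int) 1).map (fun i =>
      ((PySem.List.pyRange 0 (img1.length : Int) 1).map (fun j =>
        PySem.Int.band (PySem.List.pyGetD (PySem.List.pyGetD (pvFimg img1 a b) i []) j 0)
          (PySem.List.pyGetD (PySem.List.pyGetD img2 i []) j 0))).sum)).sum = 0 := by
    apply List.sum_eq_zero
    intro x hx
    obtain ⟨i, hi, rfl⟩ := List.mem_map.mp hx
    rw [PySem.List.mem_pyRange_one] at hi
    apply List.sum_eq_zero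
    intro y hy
    obtain ⟨j, _, rfl⟩ := List.mem_map.mp hy
    rw [hFrow i (by omega) (by omega), if_neg (by omega), pvGetD_replicate_zero,
      pvBand_zero_left]
  rw [hz1, hz3]
  have hmid : ∀ i ∈ PySem.List.pyRange (max b 0)
      (min (img1.length : Int) ((img1.length : Int) + b)) 1,
      ((PySem.List.pyRange 0 (img1.length : Int) 1).map (fun j =>
        PySem.Int.band (PySem.List.pyGetD (PySem.List.pyGetD (pvFimg img1 a b) i []) j 0)
          (PySem.List.pyGetD (PySem.List.pyGetD img2 i []) j 0))).sum =
      ((PySem.List.pyRange (max a 0) (min (img1.length : Int) ((img1.length : Int) + a)) 1).map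
        (fun j =>
        PySem.Int.band (PySem.List.pyGetD (PySem.List.pyGetD img1 (i - b) []) (j - a) 0)
          (PySem.List.pyGetD (PySem.List.pyGetD img2 i []) j 0))).sum := by
    intro i hi
    rw [PySem.List.mem_pyRange_one] at hi
    have hrli : (PySem.List.pyGetD img1 (i - b) []).length = img1.length :=
      hrl i (by omega) (by omega)
    have hrw : ∀ j ∈ PySem.List.pyRange 0 (img1.length : Int) 1,
        PySem.Int.band (PySem.List.pyGetD (PySem.List.pyGetD (pvFimg img1 a b) i []) j 0)
          (PySem.List.pyGetD (PySem.List.pyGetD img2 i []) j 0) =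
        PySem.Int.band
          (PySem.List.pyGetD (pvHsh a (PySem.List.pyGetD img1 (i - b) [])) j 0)
          (PySem.List.pyGetD (PySem.List.pyGetD img2 i []) j 0) := by
      intro j _
      rw [hFrow i (by omega) (by omega), if_pos ⟨by omega, by omega⟩]
    rw [List.map_congr_left hrw]
    rw [pvSum_split3 _ 0 (max a 0) (min (img1.length : Int) ((img1.length : Int) + a))
      (img1.length : Int) (by omega) (by omega) (by omega)]
    have hzl : ((PySem.List.pyRange 0 (max a 0) 1).map (fun j =>
        PySem.Int.band
          (PySem.List.pyGetD (pvHsh a (PySem.List.pyGetD img1 (i - b) [])) j 0)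
          (PySem.List.pyGetD (PySem.List.pyGetD img2 i []) j 0))).sum = 0 := by
      apply List.sum_eq_zero
      intro y hy
      obtain ⟨j, hj, rfl⟩ := List.mem_map.mp hy
      rw [PySem.List.mem_pyRange_one] at hj
      rw [pvHsh_getD a _ j (by omega) (by omega), if_neg (by omega), pvBand_zero_left]
    have hzr : ((PySem.List.pyRange (min (img1.length : Int) ((img1.length : Int) + a))
        (img1.length : Int) 1).map (fun j =>
        PySem.Int.band
          (PySem.List.pyGetD (pvHsh a (PySem.List.pyGetD img1 (i - b) [])) j 0)
          (PySem.List.pyGetD (PySem.List.pyGetD img2 i []) j 0))).sum = 0 := by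
      apply List.sum_eq_zero
      intro y hy
      obtain ⟨j, hj, rfl⟩ := List.mem_map.mp hy
      rw [PySem.List.mem_pyRange_one] at hj
      rw [pvHsh_getD a _ j (by omega) (by omega), if_neg (by omega), pvBand_zero_left]
    rw [hzl, hzr]
    have hmm : ∀ j ∈ PySem.List.pyRange (max a 0)
        (min (img1.length : Int) ((img1.length : Int) + a)) 1,
        PySem.Int.band
          (PySem.List.pyGetD (pvHsh a (PySem.List.pyGetD img1 (i - b) [])) j 0)
          (PySem.List.pyGetD (PySem.List.pyGetD img2 i []) j 0) =
        PySem.Int.band (PySem.List.pyGetD (PySem.List.pyGetD img1 (i - b) []) (j - a) 0)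
          (PySem.List.pyGetD (PySem.List.pyGetD img2 i []) j 0) := by
      intro j hj
      rw [PySem.List.mem_pyRange_one] at hj
      rw [pvHsh_getD a _ j (by omega) (by omega), if_pos ⟨by omega, by omega⟩]
    rw [List.map_congr_left hmm]
    omega
  rw [List.map_congr_left hmid]
  omega

lemma pvRunMax2 (F : Int → Int → Int) (l1 l2 : List Int) (c : Int) :
    c ≤ l1.foldl (fun acc x => l2.foldl
        (fun acc y => if F x y > acc then F x y else acc) acc) c ∧
    (∀ x ∈ l1, ∀ y ∈ l2, F x y ≤ l1.foldl (fun acc x => l2.foldl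
        (fun acc y => if F x y > acc then F x y else acc) acc) c) ∧
    (l1.foldl (fun acc x => l2.foldl
        (fun acc y => if F x y > acc then F x y else acc) acc) c = c ∨
      ∃ x ∈ l1, ∃ y ∈ l2, l1.foldl (fun acc x => l2.foldl
        (fun acc y => if F x y > acc then F x y else acc) acc) c = F x y) := by
  induction l1 generalizing c with
  | nil => simp
  | cons x xs ih =>
    simp only [List.foldl_cons]
    obtain ⟨r1, r2, r3⟩ := pvRunMax (F x) l2 c
    obtain ⟨h1, h2, h3⟩ := ih (l2.foldl (fun acc y => if F x y > acc then F x y else acc) c)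
    refine ⟨le_trans r1 h1, ?_, ?_⟩
    · intro z hz y hy
      rcases List.mem_cons.mp hz with rfl | hz'
      · exact le_trans (r2 y hy) h1
      · exact h2 z hz' y hy
    · rcases h3 with h | ⟨z, hz, y, hy, hzz⟩
      · rcases r3 with h' | ⟨y, hy, hyy⟩
        · exact Or.inl (h.trans h')
        · exact Or.inr ⟨x, List.mem_cons_self .., y, hy, h.trans hyy⟩
      · exact Or.inr ⟨z, List.mem_cons_of_mem _ hz, y, hy, hzz⟩

lemma pvAlt_isMax (img1 img2 : List (List Int)) (hn : 1 ≤ img1.length)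
    (hrow : ∀ r ∈ img1, r.length = img1.length)
    (h2a : img1.length ≤ img2.length)
    (h2b : ∀ r ∈ img2.take img1.length, img1.length ≤ r.length) :
    pvIsMax img1 img2 (largest_overlap4_alt img1 img2) := by
  have hrm := pvRunMax2 (fun a b => pvInnerSum img1 img2 (img1.length : Int) a b)
    (PySem.List.pyRange (1 - (img1.length : Int)) (img1.length : Int) 1)
    (PySem.List.pyRange (1 - (img1.length : Int)) (img1.length : Int) 1) 0
  obtain ⟨t1, t2, t3⟩ := hrm
  have halt : largest_overlap4_alt img1 img2 =
      (PySem.List.pyRange (1 - (img1.length : Int)) (img1.length : Int) 1).foldl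
        (fun acc a =>
          (PySem.List.pyRange (1 - (img1.length : Int)) (img1.length : Int) 1).foldl
            (fun acc b => if pvInnerSum img1 img2 (img1.length : Int) a b > acc
              then pvInnerSum img1 img2 (img1.length : Int) a b else acc) acc) 0 := by
    simp only [largest_overlap4_alt, PySem.List.len_eq]
  rw [halt]
  refine ⟨t1, ?_, ?_⟩
  · intro v hv
    have hv1 := hv.1
    have hv2 := hv.2
    have := t2 v.1 (PySem.List.mem_pyRange_one.mpr ⟨by omega, by omega⟩)
      v.2 (PySem.List.mem_pyRange_one.mpr ⟨by omega, by omega⟩)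
    rwa [← pvOv_eq_inner img1 img2 hrow h2a h2b v.1 v.2 hv1 hv2] at this
  · rcases t3 with h | ⟨x, hx, y, hy, hR⟩
    · exact Or.inl h
    · rw [PySem.List.mem_pyRange_one] at hx hy
      refine Or.inr ⟨(x, y), ⟨by simp only; omega, by simp only; omega⟩, ?_⟩
      rw [pvOv_eq_inner img1 img2 hrow h2a h2b x y (by omega) (by omega)]
      exact hR

lemma pvIsMax_unique (img1 img2 : List (List Int)) (r r' : Int)
    (h : pvIsMax img1 img2 r) (h' : pvIsMax img1 img2 r') : r = r' := by
  rcases h with ⟨h0, hub, hw⟩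
  rcases h' with ⟨h0', hub', hw'⟩
  have hle : r ≤ r' := by
    rcases hw with h | ⟨v, hv, rfl⟩
    · omega
    · exact hub' v hv
  have hge : r' ≤ r := by
    rcases hw' with h | ⟨v, hv, rfl⟩
    · omega
    · exact hub v hv
  omega

-- ===== VERDICT (by name: the statement is the Claim_ definition above) =====
theorem largest_overlap4_spec : Claim_equal_largest_overlap4 := by
  unfold Claim_equal_largest_overlap4
  intro img1 img2 _ hpre
  unfold Spec_largest_overlap4
  obtain ⟨hrowEq, h2a, h2b⟩ := hpre
  have hrow : ∀ r ∈ img1, img1.length ≤ r.length :=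
    fun r hr => le_of_eq (hrowEq r hr).symm
  by_cases hn : img1.length = 0
  · obtain rfl : img1 = [] := List.eq_nil_of_length_eq_zero hn
    rfl
  · have hn1 : 1 ≤ img1.length := by omega
    have hinv : pvInv img1 img2 [(img1, ((0:Int), (0:Int)))] [((0:Int), (0:Int))] 0 := by
      refine ⟨0, [(img1, ((0:Int), (0:Int)))], [], rfl, ?_, by simp, by simp, by simp,
        ?_, ?_, ?_, ?_, le_refl 0, Or.inl rfl⟩
      · intro x hx
        rcases List.mem_singleton.mp hx with rfl
        exact ⟨⟨by simp, by simp, Or.inl (by simpa using hn1)⟩, by simp [pvDist],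
          (pvFimg_zero img1).symm⟩
      · intro x hx
        rcases List.mem_singleton.mp hx with rfl
        simp
      · intro v _ hd
        have hv0 : v = ((0:Int), (0:Int)) := by
          obtain ⟨x, y⟩ := v
          simp only [pvDist] at hd
          simp only [Prod.ext_iff]
          constructor <;> omega
        simp [hv0]
      · intro v hv
        rcases List.mem_singleton.mp hv with rfl
        exact ⟨⟨by simp, by simp, Or.inl (by simpa using hn1)⟩, by simp [pvDist],
          fun hc => by simp [pvDist] at hc⟩
      · intro v hv hvq
        rcases List.mem_singleton.mp hv with rfl
        exact absurd (by simp) hvq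
    have hmu : pvMu img1.length [(img1, ((0:Int), (0:Int)))] [((0:Int), (0:Int))] <
        2 * (2 * img1.length + 1) ^ 2 + 1 := by
      simp only [pvMu, List.length_cons, List.length_nil, pvBoxL_length]
      have hsq : (2 * img1.length + 1) ^ 2 = (2 * img1.length + 1) * (2 * img1.length + 1) :=
        sq (2 * img1.length + 1)
      rw [hsq]
      have h1le : 1 ≤ (2 * img1.length + 1) * (2 * img1.length + 1) :=
        Nat.one_le_iff_ne_zero.mpr (by positivity)
      omega
    have hA := pvBfs_isMax img1 img2 hn1 hrow (2 * (2 * img1.length + 1) ^ 2 + 1)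
      [(img1, ((0:Int), (0:Int)))] [((0:Int), (0:Int))] 0 hinv hmu
    have hB := pvAlt_isMax img1 img2 hn1 hrowEq h2a h2b
    exact pvIsMax_unique img1 img2 _ _ hA hB
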